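-- pv_equiv track=rewrite | github.com/krista26/Sim-Project | Yahtzee.py | create_count_dict
-- ===== SOURCE A (Python) =====
-- def create_count_dict(dice):
--
--     dice=sorted(dice, reverse=True)
--     count_dic={}
--     for num in dice:
--         if num not in count_dic:
--             count_dic[num]=1
--         else:
--             count_dic[num]+=1
--
--     return count_dic
-- ===== SOURCE B (Python) =====
-- def create_count_dict(dice):
--     # Phase 1: count occurrences in one pass over dice in original order.
--     counts = {}
--     for num in dice:
--         counts[num] = counts.get(num, 0) + 1
--     # Phase 2: emit the distinct values in descending order with their counts.
--     result = {}
--     for num in sorted(counts, reverse=True):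
--         result[num] = counts[num]
--     return result
-- ===== Notes on version B (the rewrite author's own statement) =====
-- stated objective: alternative
-- what changed: A sorts all n dice descending and then counts them into a dict; B inverts the decomposition: it counts in one pass over the unsorted dice, then builds the result by iterating the distinct values sorted descending, so the two loops run over different collections (n dice vs k distinct values).
import Mathlib
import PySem

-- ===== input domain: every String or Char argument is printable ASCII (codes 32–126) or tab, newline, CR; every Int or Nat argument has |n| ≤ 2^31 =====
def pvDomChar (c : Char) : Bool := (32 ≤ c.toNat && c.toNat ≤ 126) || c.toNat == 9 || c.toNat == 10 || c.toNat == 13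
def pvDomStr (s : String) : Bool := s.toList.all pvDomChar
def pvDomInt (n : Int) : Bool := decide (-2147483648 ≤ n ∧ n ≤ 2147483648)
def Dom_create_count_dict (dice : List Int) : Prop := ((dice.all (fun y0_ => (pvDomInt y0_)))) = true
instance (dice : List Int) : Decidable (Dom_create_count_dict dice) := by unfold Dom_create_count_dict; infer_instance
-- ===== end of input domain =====

-- B counts the unsorted dice in one pass and then sorts only the distinct values; alternative decomposition (count-then-sort-distinct vs sort-then-count).

-- ===== PORT A =====
def create_count_dict (dice : List Int) : List (Int × Int) :=
  let dice' := PySem.List.sorted dice (fun x => x) true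
  let count_dic := dice'.foldl
    (fun d num =>
      if d.contains num = false then d.insert num 1
      else d.insert num (d.getD num 0 + 1))
    (PySem.Dict.empty : PySem.Dict Int Int)
  count_dic.items

-- ===== PORT B =====
def create_count_dict_alt (dice : List Int) : List (Int × Int) :=
  let counts := dice.foldl (fun d num => d.insert num (d.getD num 0 + 1)) (PySem.Dict.empty : PySem.Dict Int Int)
  let result := (PySem.List.sorted counts.keys (fun x => x) true).foldl
    (fun d num => d.insert num (counts.getD num 0)) (PySem.Dict.empty : PySem.Dict Int Int)
  result.items

-- ===== PRECONDITION & SPEC =====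
def Spec_create_count_dict (dice : List Int) (out : List (Int × Int)) : Prop := out = create_count_dict_alt dice
instance (dice : List Int) (out : List (Int × Int)) : Decidable (Spec_create_count_dict dice out) := by unfold Spec_create_count_dict; infer_instance

-- ===== CLAIM (what is proved, stated in full; the proofs are below) =====
def Claim_equal_create_count_dict : Prop := ∀ (dice : List Int), Dom_create_count_dict dice → Spec_create_count_dict dice (create_count_dict dice)

-- ===== LEMMAS AND PROOFS =====

-- set(xs) (first occurrences in order) is a sublist of xs
theorem pv_ofList_sublist {α : Type} [BEq α] [LawfulBEq α] (xs : List α) :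
    (PySem.Set.ofList xs).Sublist xs := by
  induction xs using List.reverseRecOn with
  | nil => simp [PySem.Set.ofList]
  | append_singleton xs x ih =>
    rw [PySem.Set.ofList_append_singleton]
    unfold PySem.Set.add
    split_ifs with h
    · exact ih.trans (List.sublist_append_left xs [x])
    · exact ih.append (List.Sublist.refl [x])

-- the distinct values of a descending-sorted list, in first-occurrence order, are strictly descending
theorem pv_ofList_sorted_rev_pairwise (dice : List Int) :
    (PySem.Set.ofList (PySem.List.sorted dice (fun x => x) true)).Pairwise (· > ·) := by
  have hge : (PySem.Set.ofList (PySem.List.sorted dice (fun x => x) true)).Pairwise (fun a b => b ≤ a) :=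
    (PySem.List.sorted_pairwise_rev (xs := dice) (key := fun x => x)).sublist
      (pv_ofList_sublist _)
  have hne : (PySem.Set.ofList (PySem.List.sorted dice (fun x => x) true)).Pairwise (· ≠ ·) :=
    PySem.Set.nodup_ofList _
  exact (hne.and hge).imp (fun h => lt_of_le_of_ne h.2 (Ne.symm h.1))

-- dedup-of-sorted equals sorted-of-dedup (descending)
theorem pv_ofList_sorted_comm (dice : List Int) :
    PySem.Set.ofList (PySem.List.sorted dice (fun x => x) true)
      = PySem.List.sorted (PySem.Set.ofList dice) (fun x => x) true := by
  refine (PySem.List.sorted_rev_eq_of_perm_of_pairwise_gt _ _ _ ?_ ?_).symm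
  · refine (List.perm_ext_iff_of_nodup (PySem.Set.nodup_ofList _) (PySem.Set.nodup_ofList _)).2 ?_
    intro a
    simp [PySem.Set.mem_ofList, PySem.List.mem_sorted]
  · exact pv_ofList_sorted_rev_pairwise dice

theorem pv_A_items (dice : List Int) :
    create_count_dict dice
      = (PySem.Set.ofList (PySem.List.sorted dice (fun x => x) true)).map
          (fun k => (k, (dice.count k : Int))) := by
  unfold create_count_dict
  have hcongr :
      (PySem.List.sorted dice (fun x => x) true).foldl
        (fun d num =>
          if d.contains num = false then d.insert num 1
          else d.insert num (d.getD num 0 + 1)) (PySem.Dict.empty : PySem.Dict Int Int)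
      = (PySem.List.sorted dice (fun x => x) true).foldl
        (fun d num => d.insert num (d.getD num 0 + 1)) (PySem.Dict.empty : PySem.Dict Int Int) := by
    apply PySem.List.foldl_congr_mem
    intro d num _
    by_cases h : d.contains num
    · simp [h]
    · have h0 : d.getD num 0 = 0 := PySem.Dict.getD_of_not_contains d 0 (by simpa using h)
      simp [h, h0]
  simp only [hcongr, PySem.Dict.foldl_insert_getD_add_one_eq_counter, PySem.Dict.items_counter]
  refine List.map_congr_left ?_
  intro k _
  have := (PySem.List.sorted_perm (xs := dice) (key := fun x => x) (rev := true)).count_eq k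
  simp [this]

theorem pv_B_items (dice : List Int) :
    create_count_dict_alt dice
      = (PySem.List.sorted (PySem.Set.ofList dice) (fun x => x) true).map
          (fun k => (k, (dice.count k : Int))) := by
  unfold create_count_dict_alt
  simp only [PySem.Dict.foldl_insert_getD_add_one_eq_counter, PySem.Dict.keys_counter]
  have hnd : (PySem.List.sorted (PySem.Set.ofList dice) (fun x => x) true).Nodup :=
    (PySem.List.sorted_perm _ _ _).nodup_iff.2 (PySem.Set.nodup_ofList _)
  have := PySem.Dict.items_foldl_insert_fresh
    (l := PySem.List.sorted (PySem.Set.ofList dice) (fun x => x) true)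
    (k := fun a => a) (v := fun a => (PySem.Dict.counter dice).getD a 0)
    (d := (PySem.Dict.empty : PySem.Dict Int Int))
    (by intro a _; simp [PySem.Dict.contains_empty])
    (by simpa using hnd)
  simp only [this]
  simp only [PySem.Dict.empty, List.nil_append]
  refine List.map_congr_left ?_
  intro k _
  simp [PySem.Dict.getD_counter]

-- ===== VERDICT (by name: the statement is the Claim_ definition above) =====
theorem create_count_dict_spec : Claim_equal_create_count_dict := by
  intro dice _
  show create_count_dict dice = create_count_dict_alt dice
  rw [pv_A_items, pv_B_items, pv_ofList_sorted_comm]
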